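-- pv_equiv track=rewrite | github.com/peng-kevin/advent-of-code | src/day12/visualization.py | dfs
-- ===== SOURCE A (Python) =====
-- def dfs(src, dest, used, numpaths, g):
--     if src == dest:
--         return numpaths + 1
--     for adj in g[src]:
--         if used[adj] == 0 or (used[adj] == 1 and 2 not in used.values()):
--             if adj.islower():
--                 used[adj] += 1
--             numpaths = dfs(adj, dest, used, numpaths, g)
--             if adj.islower():
--                 used[adj] -= 1
--     return numpaths
-- ===== SOURCE B (Python) =====
-- def dfs(src, dest, used, numpaths, g):
--     return numpaths + _count_paths(src, dest, dict(used), g)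
--
-- def _count_paths(node, dest, used, g):
--     if node == dest:
--         return 1
--
--     def allowed(n):
--         return used[n] == 0 or (used[n] == 1 and 2 not in used.values())
--
--     def extended(n):
--         u2 = dict(used)
--         if n.islower():
--             u2[n] += 1
--         return u2
--
--     return sum(_count_paths(n, dest, extended(n), g) for n in g[node] if allowed(n))
-- ===== Notes on version B (the rewrite author's own statement) =====
-- stated objective: alternative
-- what changed: A threads a numpaths accumulator through a DFS that mutates the shared used dict and restores it after each call; B is a side-effect-free recursion that passes an extended copy of used downward and sums the path counts of the eligible neighbours, adding numpaths once at the end. …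
-- outside the precondition, e.g. on dfs('x', 'y', {'b': 0}, 0, {'x': [], 'A': ['B']}): A returns 0, B returns 0
import Mathlib
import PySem

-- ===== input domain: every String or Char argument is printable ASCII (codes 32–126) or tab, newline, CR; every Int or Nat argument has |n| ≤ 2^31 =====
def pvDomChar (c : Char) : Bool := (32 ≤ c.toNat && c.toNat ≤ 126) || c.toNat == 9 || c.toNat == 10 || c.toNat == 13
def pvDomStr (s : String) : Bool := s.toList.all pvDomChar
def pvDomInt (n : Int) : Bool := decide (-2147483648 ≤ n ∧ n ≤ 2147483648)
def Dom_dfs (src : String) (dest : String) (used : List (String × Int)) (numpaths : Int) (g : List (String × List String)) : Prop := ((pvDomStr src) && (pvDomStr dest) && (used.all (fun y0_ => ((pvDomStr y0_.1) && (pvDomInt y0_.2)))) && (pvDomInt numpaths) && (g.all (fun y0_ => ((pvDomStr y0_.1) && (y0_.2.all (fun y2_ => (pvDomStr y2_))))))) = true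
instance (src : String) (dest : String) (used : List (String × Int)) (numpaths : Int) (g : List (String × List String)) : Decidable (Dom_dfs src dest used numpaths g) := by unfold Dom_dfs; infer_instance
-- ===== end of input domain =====

-- B replaces A's mutate-and-restore accumulator DFS by a pure recursion over copies that sums
-- child path-counts (equivalence is about the return value; A mutates `used` during the call but
-- fully restores it before returning).

-- s.islower(): at least one ASCII letter and no uppercase letter — exact on the printable-ASCII domain
def pyStrIslower (s : String) : Bool :=
  s.toList.any PySem.Chars.isalpha && s.toList.all (fun c => !PySem.Chars.isupper c)

-- ===== PORT A =====
-- fueled transliteration of A's recursion; the wrapper supplies fuel that exceeds the maximal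
-- recursion depth on every input admitted by Pre_dfs
def dfsAux : Nat → String → String → PySem.Dict String Int → Int → PySem.Dict String (List String) → Int
  | 0, _, _, _, numpaths, _ => numpaths
  | fuel+1, src, dest, used, numpaths, g =>
    if src == dest then numpaths + 1
    else
      (PySem.Dict.getD g src []).foldl (fun numpaths adj =>
        if PySem.Dict.getD used adj 0 == 0 ||
           (PySem.Dict.getD used adj 0 == 1 && !((PySem.Dict.values used).contains 2)) then
          -- Python increments used[adj], recurses, then decrements it back: the recursive call
          -- sees the incremented dict and the rest of the loop sees the original one
          dfsAux fuel adj dest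
            (if pyStrIslower adj then PySem.Dict.insert used adj (PySem.Dict.getD used adj 0 + 1) else used)
            numpaths g
        else numpaths) numpaths

def dfs (src : String) (dest : String) (used : List (String × Int)) (numpaths : Int) (g : List (String × List String)) : Int :=
  dfsAux (2 * used.length + 8) src dest (PySem.Dict.mk used) numpaths (PySem.Dict.mk g)

-- ===== PORT B =====
def bAllowed (used : PySem.Dict String Int) (n : String) : Bool :=
  PySem.Dict.getD used n 0 == 0 ||
    (PySem.Dict.getD used n 0 == 1 && !((PySem.Dict.values used).contains 2))

def bExtended (used : PySem.Dict String Int) (n : String) : PySem.Dict String Int :=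
  if pyStrIslower n then PySem.Dict.insert used n (PySem.Dict.getD used n 0 + 1) else used

def countPaths : Nat → String → String → PySem.Dict String Int → PySem.Dict String (List String) → Int
  | 0, _, _, _, _ => 0
  | fuel+1, node, dest, used, g =>
    if node == dest then 1
    else (((PySem.Dict.getD g node []).filter (bAllowed used)).map
            (fun n => countPaths fuel n dest (bExtended used n) g)).sum

def dfs_alt (src : String) (dest : String) (used : List (String × Int)) (numpaths : Int) (g : List (String × List String)) : Int :=
  numpaths + countPaths (2 * used.length + 8) src dest (PySem.Dict.mk used) (PySem.Dict.mk g)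

-- ===== PRECONDITION & SPEC =====
-- Pre_ excludes (i) duplicate-key association lists, which cannot arise from a Python dict, and
-- (ii) inputs where A raises KeyError or recurses forever, via a conservative graph-global
-- condition (every listed neighbour is a key of used; every neighbour whose count is 0 or 1 —
-- the only ones a path can ever enter — is dest or a key of g, and its edge does not join two
-- non-lowercase caves, which would allow unbounded recursion); this also excludes some
-- terminating inputs whose offending edges are unreachable from src, since reachability has no
-- closed form.
def Pre_dfs (src : String) (dest : String) (used : List (String × Int)) (numpaths : Int) (g : List (String × List String)) : Prop :=
  (used.map Prod.fst).Nodup ∧ (g.map Prod.fst).Nodup ∧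
  (src = dest ∨
    (src ∈ g.map Prod.fst ∧
     ∀ p ∈ g, ∀ n ∈ p.2,
       n ∈ used.map Prod.fst ∧
       ((PySem.Dict.getD (PySem.Dict.mk used) n 0 = 0 ∨ PySem.Dict.getD (PySem.Dict.mk used) n 0 = 1) →
         ((n = dest ∨ n ∈ g.map Prod.fst) ∧
          (pyStrIslower p.1 = true ∨ pyStrIslower n = true)))))
instance (src : String) (dest : String) (used : List (String × Int)) (numpaths : Int) (g : List (String × List String)) : Decidable (Pre_dfs src dest used numpaths g) := by unfold Pre_dfs; infer_instance

def pvWitness_dfs : String × String × (List (String × Int)) × Int × (List (String × List String)) :=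
  ("start", "end", [("start", 1), ("a", 0), ("end", 0)], 0, [("start", ["a"]), ("a", ["end"])])

def Spec_dfs (src : String) (dest : String) (used : List (String × Int)) (numpaths : Int) (g : List (String × List String)) (out : Int) : Prop := out = dfs_alt src dest used numpaths g
instance (src : String) (dest : String) (used : List (String × Int)) (numpaths : Int) (g : List (String × List String)) (out : Int) : Decidable (Spec_dfs src dest used numpaths g out) := by unfold Spec_dfs; infer_instance

-- ===== CLAIM (what is proved, stated in full; the proofs are below) =====
def Claim_equal_dfs : Prop := ∀ (src : String) (dest : String) (used : List (String × Int)) (numpaths : Int) (g : List (String × List String)), Dom_dfs src dest used numpaths g → Pre_dfs src dest used numpaths g → Spec_dfs src dest used numpaths g (dfs src dest used numpaths g)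

-- ===== LEMMAS AND PROOFS =====
theorem foldl_if_add (p : String → Bool) (F : String → Int) :
    ∀ (l : List String) (np : Int),
      l.foldl (fun np a => if p a then np + F a else np) np = np + ((l.filter p).map F).sum := by
  intro l
  induction l with
  | nil => simp
  | cons a t iht =>
    intro np
    by_cases h : p a = true <;> simp [List.foldl_cons, h, iht] <;> ring

theorem dfsAux_eq_countPaths :
    ∀ (fuel : Nat) (src dest : String) (used : PySem.Dict String Int) (np : Int)
      (g : PySem.Dict String (List String)),
      dfsAux fuel src dest used np g = np + countPaths fuel src dest used g := by
  intro fuel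
  induction fuel with
  | zero => intro src dest used np g; simp [dfsAux, countPaths]
  | succ f ih =>
    intro src dest used np g
    by_cases h : (src == dest) = true
    · simp [dfsAux, countPaths, h]
    · simp only [dfsAux, countPaths, h, Bool.false_eq_true, if_false]
      have := foldl_if_add (bAllowed used)
        (fun n => countPaths f n dest (bExtended used n) g)
        (PySem.Dict.getD g src []) np
      simp only [bAllowed, bExtended] at this
      simpa only [ih] using this

-- ===== VERDICT (by name: the statement is the Claim_ definition above) =====
theorem dfs_spec : Claim_equal_dfs := by
  intro src dest used numpaths g _ _
  unfold Spec_dfs dfs dfs_alt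
  exact dfsAux_eq_countPaths _ _ _ _ _ _
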